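-- pv_equiv track=rewrite | github.com/polegithub/visual_to_language | ImageProcessing/utils/net_compiler.py | __find_first_decimal__
-- ===== SOURCE A (Python) =====
-- def isac(c):
--     """
--     A simple function, which determine whether the
--     string element char c is belong to a decimal number
--     :param c: a string element type of char
--     :return: a bool type of determination
--     """
--     try:
--         int(c)
--         return True
--     except:
--         if c == '.' or c == '-' or c == 'e':
--             return True
--         else:
--             return False
--
-- def __find_first_decimal__(string_phase):
--     """
--     A function to find series of decimal
--     :param string_phase: string type key like moving_average_fraction
--     :return: a list stores decimals found in string_phase
--     """
--     decimals = ""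
--     for index in range(len(string_phase)):
--         if isac(string_phase[index]):
--             decimals += string_phase[index]
--         else:
--             decimals += ' '
--     for decimal in decimals.split(' '):
--         if not decimal == '':
--             return decimal
-- ===== SOURCE B (Python) =====
-- from itertools import groupby
--
-- def isac(c):
--     """
--     A simple function, which determine whether the
--     string element char c is belong to a decimal number
--     :param c: a string element type of char
--     :return: a bool type of determination
--     """
--     try:
--         int(c)
--         return True
--     except:
--         if c == '.' or c == '-' or c == 'e':
--             return True
--         else:
--             return False
--
-- def __find_first_decimal__(string_phase):
--     return next((''.join(g) for k, g in groupby(string_phase, isac) if k), None)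
-- ===== Notes on version B (the rewrite author's own statement) =====
-- stated objective: idiomatic
-- what changed: Replaces A's two-pass mask-to-spaces-then-split-on-space scan with a single itertools.groupby run-partitioning pass that returns the first run of isac-valid characters directly.
import Mathlib
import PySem

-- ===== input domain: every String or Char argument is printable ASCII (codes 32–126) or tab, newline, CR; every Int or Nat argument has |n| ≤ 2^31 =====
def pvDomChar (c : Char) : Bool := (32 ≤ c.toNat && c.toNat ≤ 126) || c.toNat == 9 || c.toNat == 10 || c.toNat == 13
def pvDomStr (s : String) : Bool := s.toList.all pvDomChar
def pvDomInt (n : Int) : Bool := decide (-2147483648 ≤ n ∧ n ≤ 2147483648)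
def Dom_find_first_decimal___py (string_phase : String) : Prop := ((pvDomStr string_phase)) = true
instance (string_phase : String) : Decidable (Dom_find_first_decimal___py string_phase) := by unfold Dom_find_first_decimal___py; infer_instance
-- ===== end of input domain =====

-- B replaces A's mask-to-spaces-then-split-on-space two-pass scan with a single groupby
-- run-partitioning pass returning the first valid run (idiomatic; same asymptotic cost).

-- ===== PORT A =====
-- isac(c): int(c) succeeds, or c is '.', '-' or 'e'  (shared helper of both Pythons)
def isac (c : Char) : Bool :=
  match PySem.Int.ofChars? [c] with
  | some _ => true
  | none => if c = '.' ∨ c = '-' ∨ c = 'e' then true else false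

-- A's second loop: return the first non-empty piece of decimals.split(' ')
def firstNonEmptyA : List (List Char) → Option String
  | [] => none
  | d :: rest => if !(d == ([] : List Char)) then some (String.ofList d) else firstNonEmptyA rest

def find_first_decimal___py (string_phase : String) : Option String :=
  let decimals : List Char :=
    (PySem.List.pyRange 0 (PySem.Str.len string_phase) 1).foldl
      (fun d i =>
        if isac (PySem.List.pyGetD string_phase.toList i ' ') then
          d ++ [PySem.List.pyGetD string_phase.toList i ' ']
        else d ++ [' ']) []
  firstNonEmptyA (PySem.Chars.splitOn decimals [' '])

-- ===== PORT B =====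
-- itertools.groupby(s, p): maximal runs of equal key, in order (hand port, exact for a char list)
def pyGroupby (p : Char → Bool) : List Char → List (Bool × List Char)
  | [] => []
  | c :: cs =>
    (p c, c :: cs.takeWhile (fun d => p d == p c)) ::
      pyGroupby p (cs.dropWhile (fun d => p d == p c))
termination_by l => l.length
decreasing_by
  exact Nat.lt_succ_of_le (List.length_dropWhile_le _ _)

-- next((''.join(g) for k, g in groupby(string_phase, isac) if k), None)
def find_first_decimal___py_alt (string_phase : String) : Option String :=
  ((pyGroupby isac string_phase.toList).find? (fun kg => kg.1)).map (fun kg => String.ofList kg.2)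

-- ===== PRECONDITION & SPEC =====
def Spec_find_first_decimal___py (string_phase : String) (out : Option String) : Prop := out = find_first_decimal___py_alt string_phase
instance (string_phase : String) (out : Option String) : Decidable (Spec_find_first_decimal___py string_phase out) := by unfold Spec_find_first_decimal___py; infer_instance

-- ===== CLAIM (what is proved, stated in full; the proofs are below) =====
def Claim_equal_find_first_decimal___py : Prop := ∀ (string_phase : String), Dom_find_first_decimal___py string_phase → Spec_find_first_decimal___py string_phase (find_first_decimal___py string_phase)

-- ===== LEMMAS AND PROOFS =====

-- proof-side structural form of splitting a char list on ' '
def splitSpAux (cur : List Char) : List Char → List (List Char)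
  | [] => [cur.reverse]
  | c :: rest => if c = ' ' then cur.reverse :: splitSpAux [] rest else splitSpAux (c :: cur) rest

theorem splitOn_go_sp (fuel : Nat) :
    ∀ (l cur : List Char) (acc : List (List Char)), l.length < fuel →
      PySem.Chars.splitOn.go [' '] fuel l cur acc = acc.reverse ++ splitSpAux cur l := by
  induction fuel with
  | zero => intro l cur acc h; omega
  | succ n ih =>
    intro l cur acc h
    cases l with
    | nil => simp [PySem.Chars.splitOn.go, splitSpAux]
    | cons c rest =>
      by_cases hc : c = ' '
      · subst hc
        simp only [PySem.Chars.splitOn.go, splitSpAux, List.isPrefixOf, List.length_cons] at *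
        rw [if_pos (by decide), if_pos trivial]
        simp only [List.length_nil, Nat.zero_add, List.drop_succ_cons, List.drop_zero]
        rw [ih rest [] (cur.reverse :: acc) (by omega)]
        simp
      · simp only [PySem.Chars.splitOn.go, splitSpAux]
        rw [if_neg (by simp [List.isPrefixOf]; exact fun hh => hc hh.symm), if_neg hc,
            ih rest (c :: cur) acc (by simp at h; omega)]

theorem splitOn_sp (l : List Char) :
    PySem.Chars.splitOn l [' '] = splitSpAux [] l := by
  unfold PySem.Chars.splitOn
  rw [splitOn_go_sp (l.length + 1) l [] [] (by omega)]
  simp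

def mask (c : Char) : Char := if isac c then c else ' '

theorem isac_space : isac ' ' = false := by decide

-- the first maximal run of isac-valid characters: the value both programs compute
def firstRun (l : List Char) : Option String :=
  let l' := l.dropWhile (fun c => !isac c)
  match l' with
  | [] => none
  | _ :: _ => some (String.ofList (l'.takeWhile isac))

theorem firstNonEmptyA_run (cs : List Char) :
    ∀ cur : List Char, cur ≠ [] →
      firstNonEmptyA (splitSpAux cur (cs.map mask)) =
        some (String.ofList (cur.reverse ++ cs.takeWhile isac)) := by
  induction cs with
  | nil =>
    intro cur hcur
    simp [splitSpAux, firstNonEmptyA, hcur]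
  | cons c cs ih =>
    intro cur hcur
    by_cases hc : isac c = true
    · have hne : c ≠ ' ' := by intro h; rw [h, isac_space] at hc; cases hc
      simp only [List.map_cons, mask, hc, if_pos, splitSpAux, if_neg hne, List.takeWhile_cons]
      rw [ih (c :: cur) (by simp)]
      simp
    · rw [Bool.not_eq_true] at hc
      have hm : mask c = ' ' := by simp [mask, hc]
      rw [List.map_cons, hm, splitSpAux, if_pos rfl]
      simp [firstNonEmptyA, hc, hcur]

theorem a_side (cs : List Char) :
    firstNonEmptyA (splitSpAux [] (cs.map mask)) = firstRun cs := by
  induction cs with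
  | nil => simp [splitSpAux, firstNonEmptyA, firstRun]
  | cons c cs ih =>
    by_cases hc : isac c = true
    · have hne : c ≠ ' ' := by intro h; rw [h, isac_space] at hc; cases hc
      simp only [List.map_cons, mask, hc, if_pos, splitSpAux, if_neg hne]
      rw [firstNonEmptyA_run cs [c] (by simp)]
      simp [firstRun, hc]
    · rw [Bool.not_eq_true] at hc
      have hm : mask c = ' ' := by simp [mask, hc]
      rw [List.map_cons, hm, splitSpAux, if_pos rfl]
      rw [show firstNonEmptyA ([].reverse :: splitSpAux [] (List.map mask cs))
            = firstNonEmptyA (splitSpAux [] (List.map mask cs)) from by simp [firstNonEmptyA], ih]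
      simp [firstRun, hc]

theorem b_side (n : Nat) : ∀ (cs : List Char), cs.length ≤ n →
    ((pyGroupby isac cs).find? (fun kg => kg.1)).map (fun kg => String.ofList kg.2) = firstRun cs := by
  induction n with
  | zero =>
    intro cs h
    have : cs = [] := by cases cs <;> simp_all
    subst this
    simp [pyGroupby, firstRun]
  | succ n ih =>
    intro cs h
    cases cs with
    | nil => simp [pyGroupby, firstRun]
    | cons c cs =>
      rw [pyGroupby]
      by_cases hc : isac c = true
      · simp only [List.find?_cons, hc, Option.map_some]
        simp [firstRun, hc]
      · rw [Bool.not_eq_true] at hc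
        simp only [List.find?_cons, hc]
        have hdw : cs.dropWhile (fun d => isac d == false) = cs.dropWhile (fun d => !isac d) := by
          congr 1; funext d; cases isac d <;> simp
        rw [hdw, ih _ (le_trans (List.length_dropWhile_le _ _) (by simp at h; omega))]
        have hidem : (cs.dropWhile fun d => !isac d).dropWhile (fun d => !isac d)
             = cs.dropWhile (fun d => !isac d) := by
          cases hd : cs.dropWhile (fun d => !isac d) with
          | nil => simp
          | cons x xs =>
            have hx := List.head?_dropWhile_not (p := fun d => !isac d) (l := cs)
            rw [hd] at hx
            simp at hx
            simp [hx]
        simp [firstRun, hc, hidem]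

theorem mask_fold (cs : List Char) :
    cs.foldl (fun d c => if isac c then d ++ [c] else d ++ [' ']) [] = cs.map mask := by
  have hf : (fun (d : List Char) c => if isac c then d ++ [c] else d ++ [' '])
       = fun d c => d ++ [mask c] := by
    funext d c; unfold mask; split <;> rfl
  rw [hf]
  exact PySem.List.foldl_append_singleton_eq_map mask cs []

-- ===== VERDICT (by name: the statement is the Claim_ definition above) =====
theorem find_first_decimal___py_spec : Claim_equal_find_first_decimal___py := by
  intro s _
  unfold Spec_find_first_decimal___py find_first_decimal___py find_first_decimal___py_alt
  rw [show (PySem.Str.len s : Int) = (s.toList.length : Int) by simp,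
      PySem.List.foldl_pyRange_zero_pyGetD' s.toList ' '
        (fun d c => if isac c then d ++ [c] else d ++ [' ']) []]
  rw [mask_fold]
  show firstNonEmptyA (PySem.Chars.splitOn (s.toList.map mask) [' ']) = _
  rw [splitOn_sp, a_side, b_side s.toList.length s.toList le_rfl]
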